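-- pv_equiv track=rewrite | github.com/JVFayad/python-tests-study | complete_series/complete_series_code.py | complete_series
-- ===== SOURCE A (Python) =====
-- from copy import copy
--
-- def complete_series(series):
--     series_ = copy(series)
--     biggest_number = 0
--
--     for x in series:
--         del series_[series_.index(x)]
--         if x in series_:
--             return [0]
--
--         if x > biggest_number:
--             biggest_number = x
--
--     return [x for x in range(0, biggest_number + 1)]
-- ===== SOURCE B (Python) =====
-- def complete_series(series):
--     if len(set(series)) != len(series):
--         return [0]
--     top = max(max(series, default=0), 0)
--     return list(range(top + 1))
-- ===== Notes on version B (the rewrite author's own statement) =====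
-- stated objective: simpler
-- what changed: Replaced A's single interleaved pass (copy of the list, index-delete duplicate check and running max per element) with two whole-collection reductions: a set-length duplicate test, then max floored at 0 and a closed-form range.
import Mathlib
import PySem

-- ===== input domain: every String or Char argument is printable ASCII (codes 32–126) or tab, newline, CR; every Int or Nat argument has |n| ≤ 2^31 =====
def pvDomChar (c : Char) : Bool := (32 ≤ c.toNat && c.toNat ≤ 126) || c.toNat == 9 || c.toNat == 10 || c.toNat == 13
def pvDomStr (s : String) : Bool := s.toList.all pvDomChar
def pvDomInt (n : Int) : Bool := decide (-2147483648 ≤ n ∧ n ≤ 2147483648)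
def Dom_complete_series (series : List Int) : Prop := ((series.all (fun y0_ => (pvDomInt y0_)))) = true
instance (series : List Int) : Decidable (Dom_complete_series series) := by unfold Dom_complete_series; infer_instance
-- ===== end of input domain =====

-- B replaces A's interleaved delete-and-scan loop by a set-length duplicate test plus a
-- closed-form range up to the max floored at 0 (objective: simpler).

-- ===== PORT A =====
-- the for-loop of A: state = (remaining iterands, series_, biggest_number)
def complete_series_go : List Int → List Int → Int → List Int
  | [], _, biggest => PySem.List.pyRange 0 (biggest + 1) 1
  | x :: rest, s, biggest =>
    match PySem.List.index? s x with
    | none => []   -- Python would raise ValueError here; unreachable (x is always in series_)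
    | some i =>
      let s' := s.eraseIdx i          -- del series_[i]
      if x ∈ s' then [0]
      else complete_series_go rest s' (if x > biggest then x else biggest)

def complete_series (series : List Int) : List Int :=
  complete_series_go series series 0

-- ===== PORT B =====
def complete_series_alt (series : List Int) : List Int :=
  if PySem.Set.len (PySem.Set.ofList series) ≠ PySem.List.len series then [0]
  else
    let m : Int := match PySem.List.max? series (fun y => y) with | none => 0 | some v => v
    let top := max m 0
    PySem.List.pyRange 0 (top + 1) 1

-- ===== PRECONDITION & SPEC =====
def Spec_complete_series (series : List Int) (out : List Int) : Prop := out = complete_series_alt series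
instance (series : List Int) (out : List Int) : Decidable (Spec_complete_series series out) := by unfold Spec_complete_series; infer_instance

-- ===== CLAIM (what is proved, stated in full; the proofs are below) =====
def Claim_equal_complete_series : Prop := ∀ (series : List Int), Dom_complete_series series → Spec_complete_series series (complete_series series)

-- ===== LEMMAS AND PROOFS =====

-- deleting at the index of the first occurrence is List.erase
lemma eraseIdx_index_eq_erase (s : List Int) (x : Int) (i : Nat)
    (h : PySem.List.index? s x = some i) : s.eraseIdx i = s.erase x := by
  obtain ⟨pre, suf, rfl, rfl, hnot⟩ := (PySem.List.index?_eq_some_iff s x i).1 h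
  clear h
  rw [List.erase_append_right _ hnot]
  simp only [List.erase_cons, BEq.rfl, if_pos]
  induction pre with
  | nil => simp
  | cons a t ih =>
      simp only [List.cons_append, List.length_cons, List.eraseIdx_cons_succ]
      rw [ih (by simp at hnot; exact hnot.2)]

lemma foldl_max_max (l : List Int) (a b : Int) :
    l.foldl max (max a b) = max a (l.foldl max b) := by
  induction l generalizing b with
  | nil => rfl
  | cons y t ih =>
      simp only [List.foldl_cons, ← ih, max_assoc]

-- characterisation of A's loop: with series_ a permutation of the remaining iterands,
-- it returns [0] iff they contain a duplicate, else the range up to the running max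
lemma go_spec (l : List Int) : ∀ (s : List Int) (b : Int), s.Perm l →
    complete_series_go l s b =
      if l.Nodup then PySem.List.pyRange 0 ((l.foldl max b) + 1) 1 else [0] := by
  induction l with
  | nil => intro s b _; simp [complete_series_go]
  | cons x rest ih =>
      intro s b hperm
      have hx : x ∈ s := hperm.mem_iff.2 (List.mem_cons_self ..)
      obtain ⟨i, hi⟩ := Option.isSome_iff_exists.1 ((PySem.List.index?_isSome_iff s x).2 hx)
      have herase : s.eraseIdx i = s.erase x := eraseIdx_index_eq_erase s x i hi
      have hperm' : (s.erase x).Perm rest := by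
        have := hperm.erase x
        simpa using this
      simp only [complete_series_go, hi, herase]
      by_cases hmem : x ∈ rest
      · rw [if_pos (hperm'.mem_iff.2 hmem)]
        simp [List.nodup_cons, hmem]
      · rw [if_neg (fun h => hmem (hperm'.mem_iff.1 h))]
        rw [ih _ _ hperm']
        have : (x :: rest).Nodup ↔ rest.Nodup := by simp [List.nodup_cons, hmem]
        rw [show (if x > b then x else b) = max b x by rw [max_def]; split_ifs <;> omega]
        simp [this, List.foldl_cons]

lemma len_ofList_eq_iff (xs : List Int) :
    (PySem.Set.ofList xs).length = xs.length ↔ xs.Nodup := by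
  constructor
  · intro h
    induction xs with
    | nil => simp
    | cons x t ih =>
        rw [PySem.Set.ofList_cons] at h
        by_cases hx : x ∈ t
        · exfalso
          have hmem : x ∈ PySem.Set.ofList t := (PySem.Set.mem_ofList t x).2 hx
          have hlt : (PySem.Set.discard (PySem.Set.ofList t) x).length
              < (PySem.Set.ofList t).length := by
            simp only [PySem.Set.discard]
            exact List.length_filter_lt_length_iff_exists.2 ⟨x, hmem, by simp⟩
          have hle := PySem.Set.length_ofList_le t
          simp only [List.length_cons] at h
          omega
        · have hd : PySem.Set.discard (PySem.Set.ofList t) x = PySem.Set.ofList t := by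
            simp only [PySem.Set.discard]
            refine List.filter_eq_self.2 (fun a ha => ?_)
            have haa : a ∈ t := (PySem.Set.mem_ofList t a).1 ha
            simp only [Bool.not_eq_eq_eq_not, Bool.not_true, beq_eq_false_iff_ne, ne_eq]
            rintro rfl; exact hx haa
          rw [hd] at h
          simp only [List.length_cons] at h
          exact List.nodup_cons.2 ⟨hx, ih (by omega)⟩
  · intro h; rw [PySem.Set.ofList_eq_self_of_nodup xs h]

lemma max_getD_eq_foldl (xs : List Int) :
    max (match PySem.List.max? xs (fun y => y) with | none => 0 | some v => v) 0
      = xs.foldl max 0 := by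
  cases xs with
  | nil => decide
  | cons x t =>
      rw [PySem.List.max?_id_cons]
      simp only [List.foldl_cons]
      rw [max_comm (t.foldl max x) 0, ← foldl_max_max, max_comm 0 x]

-- ===== VERDICT (by name: the statement is the Claim_ definition above) =====
theorem complete_series_spec : Claim_equal_complete_series := by
  intro series _
  unfold Spec_complete_series complete_series complete_series_alt
  rw [go_spec series series 0 (List.Perm.refl series)]
  simp only [PySem.Set.len, PySem.List.len_eq]
  by_cases hnd : series.Nodup
  · rw [if_pos hnd, if_neg (by simp [(len_ofList_eq_iff series).2 hnd])]
    rw [max_getD_eq_foldl]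
  · rw [if_neg hnd, if_pos ?_]
    intro h
    exact hnd ((len_ofList_eq_iff series).1 (by exact_mod_cast h))
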